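-- pv_equiv track=rewrite | github.com/ASSERT-KTH/C4B_APR | data_directory/2161_problem_id/2014_author_id/Accepted.py | count
-- ===== SOURCE A (Python) =====
-- def count(M):
--     count=[0]*3
--     for i in range(3):
--         for j in range(3):
--             if M[i][j]=='X':
--                count[0]+=1
--             elif M[i][j]=='0':
--                count[1]+=1
--             else:
--                count[2]+=1
--     return count
-- ===== SOURCE B (Python) =====
-- def count(M):
--     flat = [M[i][j] for i in range(3) for j in range(3)]
--     x = flat.count('X')
--     z = flat.count('0')
--     return [x, z, 9 - x - z]
-- ===== Notes on version B (the rewrite author's own statement) =====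
-- stated objective: simpler
-- what changed: Replaces the per-cell if/elif/else accumulator loop over a mutable 3-slot list with flattening the 9 cells once and using two targeted list.count scans, deriving the third tally by the closed form 9 - x - z.
import Mathlib
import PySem

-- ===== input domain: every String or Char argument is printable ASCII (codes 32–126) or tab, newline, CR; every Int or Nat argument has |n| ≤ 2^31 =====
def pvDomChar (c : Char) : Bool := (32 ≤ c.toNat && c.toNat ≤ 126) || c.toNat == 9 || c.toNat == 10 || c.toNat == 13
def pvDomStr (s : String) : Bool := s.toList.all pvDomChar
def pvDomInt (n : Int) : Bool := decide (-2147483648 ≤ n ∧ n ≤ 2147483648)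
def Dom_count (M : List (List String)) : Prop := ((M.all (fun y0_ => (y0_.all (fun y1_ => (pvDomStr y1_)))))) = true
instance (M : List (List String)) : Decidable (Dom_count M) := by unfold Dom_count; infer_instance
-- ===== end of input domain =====

-- B replaces A's per-cell if/elif/else tally loop by flattening the 9 cells and two
-- targeted count scans, deriving the third tally as 9 - x - z (simpler decomposition).
-- A raises IndexError unless the grid has at least 3 rows each of length ≥ 3; Pre_ excludes that.

-- ===== PORT A =====
def count (M : List (List String)) : List Int :=
  (PySem.List.pyRange 0 3 1).foldl (fun cnt i =>
    (PySem.List.pyRange 0 3 1).foldl (fun cnt j =>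
      if PySem.List.pyGetD (PySem.List.pyGetD M i []) j "" = "X" then
        cnt.set 0 (cnt.getD 0 0 + 1)
      else if PySem.List.pyGetD (PySem.List.pyGetD M i []) j "" = "0" then
        cnt.set 1 (cnt.getD 1 0 + 1)
      else
        cnt.set 2 (cnt.getD 2 0 + 1)) cnt) ([0, 0, 0] : List Int)

-- ===== PORT B =====
def count_alt (M : List (List String)) : List Int :=
  let flat := (PySem.List.pyRange 0 3 1).flatMap (fun i =>
    (PySem.List.pyRange 0 3 1).map (fun j =>
      PySem.List.pyGetD (PySem.List.pyGetD M i []) j ""))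
  let x : Int := PySem.List.count flat "X"
  let z : Int := PySem.List.count flat "0"
  [x, z, 9 - x - z]

-- ===== PRECONDITION & SPEC =====
-- A indexes M[i][j] for i,j < 3: Pre_ excludes exactly the inputs where Python raises IndexError.
def Pre_count (M : List (List String)) : Prop :=
  3 ≤ M.length ∧ ∀ r ∈ M.take 3, 3 ≤ r.length
instance (M : List (List String)) : Decidable (Pre_count M) := by unfold Pre_count; infer_instance
def pvWitness_count : List (List String) :=
  [["X", "0", "."], ["0", "X", "X"], [".", ".", "0"]]
def Spec_count (M : List (List String)) (out : List Int) : Prop := out = count_alt M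
instance (M : List (List String)) (out : List Int) : Decidable (Spec_count M out) := by unfold Spec_count; infer_instance

-- ===== CLAIM (what is proved, stated in full; the proofs are below) =====
def Claim_equal_count : Prop := ∀ (M : List (List String)), Dom_count M → Pre_count M → Spec_count M (count M)

-- ===== LEMMAS AND PROOFS =====

-- A's cell step: the body of A's inner loop as a function of the tally list and a cell.
def stepA (cnt : List Int) (c : String) : List Int :=
  if c = "X" then cnt.set 0 (cnt.getD 0 0 + 1)
  else if c = "0" then cnt.set 1 (cnt.getD 1 0 + 1)
  else cnt.set 2 (cnt.getD 2 0 + 1)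

-- Characterization of A's tally loop over any cell list, on a 3-slot state.
lemma foldl_stepA (l : List String) (a b c : Int) :
    l.foldl stepA [a, b, c] =
      [a + (l.count "X" : Int), b + (l.count "0" : Int),
       c + ((l.length : Int) - (l.count "X" : Int) - (l.count "0" : Int))] := by
  induction l generalizing a b c with
  | nil => simp
  | cons x t ih =>
    by_cases hx : x = "X"
    · subst hx
      simp [stepA, ih]
      omega
    · by_cases hz : x = "0"
      · subst hz
        simp [stepA, hx, ih]
        omega
      · simp [stepA, hx, hz, ih]
        omega

-- ===== VERDICT (by name: the statement is the Claim_ definition above) =====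
theorem count_spec : Claim_equal_count := by
  intro M _ _
  unfold Spec_count count_alt
  have hA : count M =
      ((PySem.List.pyRange 0 3 1).flatMap (fun i =>
        (PySem.List.pyRange 0 3 1).map (fun j =>
          PySem.List.pyGetD (PySem.List.pyGetD M i []) j ""))).foldl stepA [0, 0, 0] := by
    rw [List.foldl_flatMap]
    simp only [List.foldl_map]
    rfl
  rw [hA, foldl_stepA]
  have hr : PySem.List.pyRange 0 3 1 = [0, 1, 2] := by decide
  simp only [hr, List.flatMap_cons, List.flatMap_nil, List.map_cons, List.map_nil,
    List.append_nil, List.cons_append, List.nil_append, List.length_cons, List.length_nil,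
    PySem.List.count_eq]
  norm_num
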